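-- pv_equiv track=rewrite | github.com/orysiayashchun/IntervalCalculus | functions.py | mult_intervals
-- ===== SOURCE A (Python) =====
-- def mult_intervals(interval_1,interval_2):
--     res_interval=[]
--     min_mult=interval_1[0]*interval_2[0]
--     max_mult=interval_1[0]*interval_2[0]
--     for i in range(len(interval_1)):
--         for j in range(len(interval_2)):
--             if(interval_1[i]*interval_2[j]<min_mult):
--                 min_mult=interval_1[i]*interval_2[j]
--             if(interval_1[i]*interval_2[j]>max_mult):
--                 max_mult=interval_1[i]*interval_2[j]
--     res_interval.append(min_mult)
--     res_interval.append(max_mult)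
--     return res_interval
-- ===== SOURCE B (Python) =====
-- def mult_intervals(interval_1, interval_2):
--     lo1, hi1 = min(interval_1), max(interval_1)
--     lo2, hi2 = min(interval_2), max(interval_2)
--     corners = [lo1 * lo2, lo1 * hi2, hi1 * lo2, hi1 * hi2]
--     return [min(corners), max(corners)]
-- ===== Notes on version B (the rewrite author's own statement) =====
-- stated objective: faster
-- what changed: Replaces the O(n*m) scan over all element pairs by computing min/max of each list and taking the extremes of the four corner products (O(n+m)).
import Mathlib
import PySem

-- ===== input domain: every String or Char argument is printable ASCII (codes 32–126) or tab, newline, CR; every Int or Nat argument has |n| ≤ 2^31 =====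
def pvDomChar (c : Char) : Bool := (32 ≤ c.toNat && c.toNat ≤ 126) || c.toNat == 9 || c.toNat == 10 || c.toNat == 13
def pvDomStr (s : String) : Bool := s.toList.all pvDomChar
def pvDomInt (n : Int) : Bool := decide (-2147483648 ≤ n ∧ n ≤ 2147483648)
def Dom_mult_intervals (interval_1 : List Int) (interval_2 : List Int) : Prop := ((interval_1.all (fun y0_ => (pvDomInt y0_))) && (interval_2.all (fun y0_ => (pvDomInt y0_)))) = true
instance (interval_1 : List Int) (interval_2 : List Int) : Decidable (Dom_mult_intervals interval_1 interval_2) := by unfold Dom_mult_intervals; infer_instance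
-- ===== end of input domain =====

-- B replaces A's O(n*m) scan over all element pairs by min/max of each list and the four corner products.

-- ===== PORT A =====
-- literal transliteration of A: running min/max over the nested index loops
def mult_intervals (interval_1 : List Int) (interval_2 : List Int) : List Int :=
  let min_mult := PySem.List.pyGetD interval_1 0 0 * PySem.List.pyGetD interval_2 0 0
  let max_mult := PySem.List.pyGetD interval_1 0 0 * PySem.List.pyGetD interval_2 0 0
  let st := (PySem.List.pyRange 0 (interval_1.length : Int) 1).foldl (fun st i =>
      (PySem.List.pyRange 0 (interval_2.length : Int) 1).foldl (fun st j =>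
        let st1 := if PySem.List.pyGetD interval_1 i 0 * PySem.List.pyGetD interval_2 j 0 < st.1
                   then (PySem.List.pyGetD interval_1 i 0 * PySem.List.pyGetD interval_2 j 0, st.2) else st
        if PySem.List.pyGetD interval_1 i 0 * PySem.List.pyGetD interval_2 j 0 > st1.2
        then (st1.1, PySem.List.pyGetD interval_1 i 0 * PySem.List.pyGetD interval_2 j 0) else st1) st)
    (min_mult, max_mult)
  [st.1, st.2]

-- ===== PORT B =====
-- literal transliteration of B: min/max of each list, then extremes of the four corner products
def mult_intervals_alt (interval_1 : List Int) (interval_2 : List Int) : List Int :=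
  match PySem.List.min? interval_1 (fun y => y), PySem.List.max? interval_1 (fun y => y),
        PySem.List.min? interval_2 (fun y => y), PySem.List.max? interval_2 (fun y => y) with
  | some lo1, some hi1, some lo2, some hi2 =>
    let corners := [lo1 * lo2, lo1 * hi2, hi1 * lo2, hi1 * hi2]
    match PySem.List.min? corners (fun y => y), PySem.List.max? corners (fun y => y) with
    | some mn, some mx => [mn, mx]
    | _, _ => []
  | _, _, _, _ => []

-- ===== PRECONDITION & SPEC =====
-- A raises IndexError on an empty list (and Python's min/max in B raise ValueError there), so both lists must be nonempty.
def Pre_mult_intervals (interval_1 : List Int) (interval_2 : List Int) : Prop :=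
  interval_1 ≠ [] ∧ interval_2 ≠ []
instance (interval_1 : List Int) (interval_2 : List Int) : Decidable (Pre_mult_intervals interval_1 interval_2) := by unfold Pre_mult_intervals; infer_instance

def pvWitness_mult_intervals : List Int × List Int := ([-2, 3], [5, -1, 0])

def Spec_mult_intervals (interval_1 : List Int) (interval_2 : List Int) (out : List Int) : Prop := out = mult_intervals_alt interval_1 interval_2
instance (interval_1 : List Int) (interval_2 : List Int) (out : List Int) : Decidable (Spec_mult_intervals interval_1 interval_2 out) := by unfold Spec_mult_intervals; infer_instance

-- ===== CLAIM (what is proved, stated in full; the proofs are below) =====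
def Claim_equal_mult_intervals : Prop := ∀ (interval_1 : List Int) (interval_2 : List Int), Dom_mult_intervals interval_1 interval_2 → Pre_mult_intervals interval_1 interval_2 → Spec_mult_intervals interval_1 interval_2 (mult_intervals interval_1 interval_2)

-- ===== LEMMAS AND PROOFS =====

lemma pvNestMin (l1 l2 : List Int) (a : Int) :
    (l1.foldl (fun a x => l2.foldl (fun m y => min m (x * y)) a) a ≤ a ∧
     ∀ x ∈ l1, ∀ y ∈ l2, l1.foldl (fun a x => l2.foldl (fun m y => min m (x * y)) a) a ≤ x * y) ∧
    (l1.foldl (fun a x => l2.foldl (fun m y => min m (x * y)) a) a = a ∨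
     ∃ x ∈ l1, ∃ y ∈ l2, l1.foldl (fun a x => l2.foldl (fun m y => min m (x * y)) a) a = x * y) := by
  induction l1 generalizing a with
  | nil => simp
  | cons x t ih =>
    have hinner : l2.foldl (fun m y => min m (x * y)) a = (l2.map (fun y => x * y)).foldl min a := by
      rw [List.foldl_map]
    obtain ⟨⟨hle, hall⟩, hmem⟩ := ih (l2.foldl (fun m y => min m (x * y)) a)
    have hle2 := (PySem.List.foldl_min_le (l2.map (fun y => x * y)) a).1
    have hall2 := (PySem.List.foldl_min_le (l2.map (fun y => x * y)) a).2
    have hmem2 := PySem.List.foldl_min_mem (l2.map (fun y => x * y)) a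
    rw [← hinner] at hle2 hall2 hmem2
    refine ⟨⟨le_trans hle hle2, ?_⟩, ?_⟩
    · intro x' hx' y hy
      rcases List.mem_cons.1 hx' with rfl | hx'
      · exact le_trans hle (hall2 _ (List.mem_map.2 ⟨y, hy, rfl⟩))
      · exact hall x' hx' y hy
    · rcases hmem with heq | ⟨x', hx', y, hy, heq⟩
      · rw [List.foldl_cons, heq]
        rcases hmem2 with h2 | h2
        · exact Or.inl h2
        · obtain ⟨y, hy, hyeq⟩ := List.mem_map.1 h2
          exact Or.inr ⟨x, List.mem_cons_self .., y, hy, hyeq.symm⟩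
      · exact Or.inr ⟨x', List.mem_cons_of_mem _ hx', y, hy, heq⟩

lemma pvNestMax (l1 l2 : List Int) (b : Int) :
    (b ≤ l1.foldl (fun b x => l2.foldl (fun m y => max m (x * y)) b) b ∧
     ∀ x ∈ l1, ∀ y ∈ l2, x * y ≤ l1.foldl (fun b x => l2.foldl (fun m y => max m (x * y)) b) b) ∧
    (l1.foldl (fun b x => l2.foldl (fun m y => max m (x * y)) b) b = b ∨
     ∃ x ∈ l1, ∃ y ∈ l2, l1.foldl (fun b x => l2.foldl (fun m y => max m (x * y)) b) b = x * y) := by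
  induction l1 generalizing b with
  | nil => simp
  | cons x t ih =>
    have hinner : l2.foldl (fun m y => max m (x * y)) b = (l2.map (fun y => x * y)).foldl max b := by
      rw [List.foldl_map]
    obtain ⟨⟨hle, hall⟩, hmem⟩ := ih (l2.foldl (fun m y => max m (x * y)) b)
    have hle2 := (PySem.List.le_foldl_max (l2.map (fun y => x * y)) b).1
    have hall2 := (PySem.List.le_foldl_max (l2.map (fun y => x * y)) b).2
    have hmem2 := PySem.List.foldl_max_mem (l2.map (fun y => x * y)) b
    rw [← hinner] at hle2 hall2 hmem2
    refine ⟨⟨le_trans hle2 hle, ?_⟩, ?_⟩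
    · intro x' hx' y hy
      rcases List.mem_cons.1 hx' with rfl | hx'
      · exact le_trans (hall2 _ (List.mem_map.2 ⟨y, hy, rfl⟩)) hle
      · exact hall x' hx' y hy
    · rcases hmem with heq | ⟨x', hx', y, hy, heq⟩
      · rw [List.foldl_cons, heq]
        rcases hmem2 with h2 | h2
        · exact Or.inl h2
        · obtain ⟨y, hy, hyeq⟩ := List.mem_map.1 h2
          exact Or.inr ⟨x, List.mem_cons_self .., y, hy, hyeq.symm⟩
      · exact Or.inr ⟨x', List.mem_cons_of_mem _ hx', y, hy, heq⟩

lemma pvCorner_min (lo1 hi1 lo2 hi2 x y : Int)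
    (h1 : lo1 ≤ x) (h2 : x ≤ hi1) (h3 : lo2 ≤ y) (h4 : y ≤ hi2) :
    min (min (min (lo1 * lo2) (lo1 * hi2)) (hi1 * lo2)) (hi1 * hi2) ≤ x * y := by
  rcases le_total 0 y with hy | hy
  · rcases le_total 0 lo1 with hl | hl
    · have hA : lo1 * lo2 ≤ lo1 * y := mul_le_mul_of_nonneg_left h3 hl
      have hB : lo1 * y ≤ x * y := mul_le_mul_of_nonneg_right h1 hy
      refine le_trans ?_ (le_trans hA hB); simp
    · have hA : lo1 * hi2 ≤ lo1 * y := mul_le_mul_of_nonpos_left h4 hl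
      have hB : lo1 * y ≤ x * y := mul_le_mul_of_nonneg_right h1 hy
      refine le_trans ?_ (le_trans hA hB); simp
  · rcases le_total 0 hi1 with hl | hl
    · have hA : hi1 * lo2 ≤ hi1 * y := mul_le_mul_of_nonneg_left h3 hl
      have hB : hi1 * y ≤ x * y := mul_le_mul_of_nonpos_right h2 hy
      refine le_trans ?_ (le_trans hA hB); simp
    · have hA : hi1 * hi2 ≤ hi1 * y := mul_le_mul_of_nonpos_left h4 hl
      have hB : hi1 * y ≤ x * y := mul_le_mul_of_nonpos_right h2 hy
      refine le_trans ?_ (le_trans hA hB); simp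

lemma pvCorner_max (lo1 hi1 lo2 hi2 x y : Int)
    (h1 : lo1 ≤ x) (h2 : x ≤ hi1) (h3 : lo2 ≤ y) (h4 : y ≤ hi2) :
    x * y ≤ max (max (max (lo1 * lo2) (lo1 * hi2)) (hi1 * lo2)) (hi1 * hi2) := by
  rcases le_total 0 y with hy | hy
  · rcases le_total 0 hi1 with hl | hl
    · have hB : x * y ≤ hi1 * y := mul_le_mul_of_nonneg_right h2 hy
      have hA : hi1 * y ≤ hi1 * hi2 := mul_le_mul_of_nonneg_left h4 hl
      refine le_trans (le_trans hB hA) ?_; simp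
    · have hB : x * y ≤ hi1 * y := mul_le_mul_of_nonneg_right h2 hy
      have hA : hi1 * y ≤ hi1 * lo2 := mul_le_mul_of_nonpos_left h3 hl
      refine le_trans (le_trans hB hA) ?_; simp
  · rcases le_total 0 lo1 with hl | hl
    · have hB : x * y ≤ lo1 * y := mul_le_mul_of_nonpos_right h1 hy
      have hA : lo1 * y ≤ lo1 * hi2 := mul_le_mul_of_nonneg_left h4 hl
      refine le_trans (le_trans hB hA) ?_; simp
    · have hB : x * y ≤ lo1 * y := mul_le_mul_of_nonpos_right h1 hy
      have hA : lo1 * y ≤ lo1 * lo2 := mul_le_mul_of_nonpos_left h3 hl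
      refine le_trans (le_trans hB hA) ?_; simp

lemma pvStep_funext' (p : Int → Int) :
    (fun (st : Int × Int) j =>
        let st1 := if p j < st.1 then (p j, st.2) else st
        if p j > st1.2 then (st1.1, p j) else st1)
      = (fun (st : Int × Int) j => (min st.1 (p j), max st.2 (p j))) := by
  funext st j
  dsimp only
  split_ifs <;> simp_all [Prod.ext_iff] <;> omega

lemma pvPairFold' {α : Type} (l : List α) (f g : Int → α → Int) (p : Int × Int) :
    l.foldl (fun (st : Int × Int) y => (f st.1 y, g st.2 y)) p = (l.foldl f p.1, l.foldl g p.2) := by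
  induction l generalizing p with
  | nil => rfl
  | cons h t ih => simpa using ih (f p.1 h, g p.2 h)

lemma pvPairFold2 {U V : Type} (l : List U) (l2 : List V) (p : U → V → Int) (q : Int × Int) :
    l.foldl (fun (st : Int × Int) i =>
        (l2.foldl (fun m j => min m (p i j)) st.1, l2.foldl (fun m j => max m (p i j)) st.2)) q
      = (l.foldl (fun a i => l2.foldl (fun m j => min m (p i j)) a) q.1,
         l.foldl (fun b i => l2.foldl (fun m j => max m (p i j)) b) q.2) :=
  pvPairFold' l (fun a i => l2.foldl (fun m j => min m (p i j)) a)
    (fun b i => l2.foldl (fun m j => max m (p i j)) b) q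

lemma pvPairFoldMM {V : Type} (l : List V) (p : V → Int) (q : Int × Int) :
    l.foldl (fun (st : Int × Int) y => (min st.1 (p y), max st.2 (p y))) q
      = (l.foldl (fun m y => min m (p y)) q.1, l.foldl (fun m y => max m (p y)) q.2) :=
  pvPairFold' l (fun m y => min m (p y)) (fun m y => max m (p y)) q

lemma pvA_eval (l1 l2 : List Int) :
    mult_intervals l1 l2 =
      [l1.foldl (fun a x => l2.foldl (fun m y => min m (x * y)) a)
          (PySem.List.pyGetD l1 0 0 * PySem.List.pyGetD l2 0 0),
       l1.foldl (fun b x => l2.foldl (fun m y => max m (x * y)) b)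
          (PySem.List.pyGetD l1 0 0 * PySem.List.pyGetD l2 0 0)] := by
  unfold mult_intervals
  dsimp only
  simp only [pvStep_funext', pvPairFoldMM, pvPairFold2]
  rw [PySem.List.foldl_pyRange_zero_pyGetD' l1 0
      (fun (a : Int) (x : Int) =>
        (PySem.List.pyRange 0 (l2.length : Int) 1).foldl
          (fun m j => min m (x * PySem.List.pyGetD l2 j 0)) a),
      PySem.List.foldl_pyRange_zero_pyGetD' l1 0
      (fun (b : Int) (x : Int) =>
        (PySem.List.pyRange 0 (l2.length : Int) 1).foldl
          (fun m j => max m (x * PySem.List.pyGetD l2 j 0)) b)]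
  rw [show (fun (a : Int) (x : Int) =>
        (PySem.List.pyRange 0 (l2.length : Int) 1).foldl
          (fun m j => min m (x * PySem.List.pyGetD l2 j 0)) a)
      = (fun a x => l2.foldl (fun m y => min m (x * y)) a) from
    funext fun a => funext fun x =>
      PySem.List.foldl_pyRange_zero_pyGetD' l2 0 (fun m y => min m (x * y)) a]
  rw [show (fun (b : Int) (x : Int) =>
        (PySem.List.pyRange 0 (l2.length : Int) 1).foldl
          (fun m j => max m (x * PySem.List.pyGetD l2 j 0)) b)
      = (fun b x => l2.foldl (fun m y => max m (x * y)) b) from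
    funext fun b => funext fun x =>
      PySem.List.foldl_pyRange_zero_pyGetD' l2 0 (fun m y => max m (x * y)) b]

theorem pv_main (l1 l2 : List Int) (h1 : l1 ≠ []) (h2 : l2 ≠ []) :
    mult_intervals l1 l2 = mult_intervals_alt l1 l2 := by
  obtain ⟨a1, t1, rfl⟩ := List.exists_cons_of_ne_nil h1
  obtain ⟨a2, t2, rfl⟩ := List.exists_cons_of_ne_nil h2
  have hg1 : PySem.List.pyGetD (a1 :: t1) 0 0 = a1 := by simp [pysem]
  have hg2 : PySem.List.pyGetD (a2 :: t2) 0 0 = a2 := by simp [pysem]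
  have hmin1 := PySem.List.min?_id_cons a1 t1
  have hmax1 := PySem.List.max?_id_cons a1 t1
  have hmin2 := PySem.List.min?_id_cons a2 t2
  have hmax2 := PySem.List.max?_id_cons a2 t2
  set lo1 := t1.foldl min a1 with hlo1
  set hi1 := t1.foldl max a1 with hhi1
  set lo2 := t2.foldl min a2 with hlo2
  set hi2 := t2.foldl max a2 with hhi2
  have hB : mult_intervals_alt (a1 :: t1) (a2 :: t2) =
      [min (min (min (lo1 * lo2) (lo1 * hi2)) (hi1 * lo2)) (hi1 * hi2),
       max (max (max (lo1 * lo2) (lo1 * hi2)) (hi1 * lo2)) (hi1 * hi2)] := by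
    unfold mult_intervals_alt
    rw [hmin1, hmax1, hmin2, hmax2]
    simp [PySem.List.min?_id_cons, PySem.List.max?_id_cons, List.foldl]
  rw [pvA_eval, hg1, hg2, hB]
  -- membership and bound facts for the extrema
  have hlo1m : lo1 ∈ a1 :: t1 := PySem.List.min?_mem hmin1
  have hhi1m : hi1 ∈ a1 :: t1 := PySem.List.max?_mem hmax1
  have hlo2m : lo2 ∈ a2 :: t2 := PySem.List.min?_mem hmin2
  have hhi2m : hi2 ∈ a2 :: t2 := PySem.List.max?_mem hmax2
  have hlo1b : ∀ x ∈ a1 :: t1, lo1 ≤ x := PySem.List.min?_isMin hmin1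
  have hhi1b : ∀ x ∈ a1 :: t1, x ≤ hi1 := PySem.List.max?_isMax hmax1
  have hlo2b : ∀ y ∈ a2 :: t2, lo2 ≤ y := PySem.List.min?_isMin hmin2
  have hhi2b : ∀ y ∈ a2 :: t2, y ≤ hi2 := PySem.List.max?_isMax hmax2
  obtain ⟨⟨_, hminall⟩, hminmem⟩ := pvNestMin (a1 :: t1) (a2 :: t2) (a1 * a2)
  obtain ⟨⟨_, hmaxall⟩, hmaxmem⟩ := pvNestMax (a1 :: t1) (a2 :: t2) (a1 * a2)
  congr 1
  · -- min component
    apply le_antisymm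
    · exact le_min (le_min (le_min (hminall _ hlo1m _ hlo2m) (hminall _ hlo1m _ hhi2m))
        (hminall _ hhi1m _ hlo2m)) (hminall _ hhi1m _ hhi2m)
    · rcases hminmem with heq | ⟨x, hx, y, hy, heq⟩
      · rw [heq]
        exact pvCorner_min _ _ _ _ _ _ (hlo1b _ (List.mem_cons_self ..))
          (hhi1b _ (List.mem_cons_self ..)) (hlo2b _ (List.mem_cons_self ..))
          (hhi2b _ (List.mem_cons_self ..))
      · rw [heq]
        exact pvCorner_min _ _ _ _ _ _ (hlo1b _ hx) (hhi1b _ hx) (hlo2b _ hy) (hhi2b _ hy)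
  · congr 1
    apply le_antisymm
    · rcases hmaxmem with heq | ⟨x, hx, y, hy, heq⟩
      · rw [heq]
        exact pvCorner_max _ _ _ _ _ _ (hlo1b _ (List.mem_cons_self ..))
          (hhi1b _ (List.mem_cons_self ..)) (hlo2b _ (List.mem_cons_self ..))
          (hhi2b _ (List.mem_cons_self ..))
      · rw [heq]
        exact pvCorner_max _ _ _ _ _ _ (hlo1b _ hx) (hhi1b _ hx) (hlo2b _ hy) (hhi2b _ hy)
    · exact max_le (max_le (max_le (hmaxall _ hlo1m _ hlo2m) (hmaxall _ hlo1m _ hhi2m))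
        (hmaxall _ hhi1m _ hlo2m)) (hmaxall _ hhi1m _ hhi2m)

-- ===== VERDICT (by name: the statement is the Claim_ definition above) =====
theorem mult_intervals_spec : Claim_equal_mult_intervals := by
  intro l1 l2 _ hpre
  unfold Spec_mult_intervals
  exact pv_main l1 l2 hpre.1 hpre.2
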